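-- pv_equiv track=rewrite | github.com/CarlyAThomas/CodeSynapse | backend/problems/apple_sharing.py | min_moves_to_share_apples
-- ===== SOURCE A (Python) =====
-- def min_moves_to_share_apples(apples, k):
--     from collections import Counter
--     count = Counter(apples)
--     total_moves = 0
--     for num_apples, freq in count.items():
--         if num_apples < k:
--             total_moves += freq * (k - num_apples)
--     return total_moves
-- ===== SOURCE B (Python) =====
-- def min_moves_to_share_apples(apples, k):
--     # Sort ascending, scan the short apples only (early break once a >= k),
--     # and use the closed form k*m - (sum of the m short apples).
--     total_short = 0
--     count_short = 0
--     for a in sorted(apples):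
--         if a >= k:
--             break
--         total_short += a
--         count_short += 1
--     return k * count_short - total_short
-- ===== Notes on version B (the rewrite author's own statement) =====
-- stated objective: alternative
-- what changed: B sorts the list, scans only the prefix of apples below k with an early break, and returns the closed form k*m - sum(prefix), instead of A's frequency-table pass over distinct values with per-value deficit times frequency.
import Mathlib
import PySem

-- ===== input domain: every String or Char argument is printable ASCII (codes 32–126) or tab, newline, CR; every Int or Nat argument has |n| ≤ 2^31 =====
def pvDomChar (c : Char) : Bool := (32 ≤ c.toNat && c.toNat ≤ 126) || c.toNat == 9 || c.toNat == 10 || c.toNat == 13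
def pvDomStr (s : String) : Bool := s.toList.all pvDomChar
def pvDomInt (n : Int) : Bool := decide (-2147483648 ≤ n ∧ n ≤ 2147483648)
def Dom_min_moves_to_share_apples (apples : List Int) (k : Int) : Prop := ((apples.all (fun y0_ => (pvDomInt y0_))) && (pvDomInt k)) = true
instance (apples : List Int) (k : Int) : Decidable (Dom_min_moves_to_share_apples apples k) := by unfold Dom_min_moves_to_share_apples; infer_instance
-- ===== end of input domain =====

-- B sorts, scans only the below-k prefix with an early break, and returns the closed form k*m - sum(prefix) (alternative algorithm).

-- ===== PORT A =====
def min_moves_to_share_apples (apples : List Int) (k : Int) : Int :=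
  let count := PySem.Dict.counter apples
  count.items.foldl
    (fun total_moves p => if p.1 < k then total_moves + p.2 * (k - p.1) else total_moves) 0

-- ===== PORT B =====
-- the for-loop with break over the sorted list, state = (total_short, count_short)
def pvAltLoop (k : Int) : List Int → Int × Int → Int × Int
  | [], st => st
  | a :: rest, (ts, cs) => if a ≥ k then (ts, cs) else pvAltLoop k rest (ts + a, cs + 1)

def min_moves_to_share_apples_alt (apples : List Int) (k : Int) : Int :=
  let st := pvAltLoop k (PySem.List.sorted apples (fun x => x) false) (0, 0)
  k * st.2 - st.1

-- ===== PRECONDITION & SPEC =====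
def Spec_min_moves_to_share_apples (apples : List Int) (k : Int) (out : Int) : Prop := out = min_moves_to_share_apples_alt apples k
instance (apples : List Int) (k : Int) (out : Int) : Decidable (Spec_min_moves_to_share_apples apples k out) := by unfold Spec_min_moves_to_share_apples; infer_instance

-- ===== CLAIM =====
def Claim_equal_min_moves_to_share_apples : Prop := ∀ (apples : List Int) (k : Int), Dom_min_moves_to_share_apples apples k → Spec_min_moves_to_share_apples apples k (min_moves_to_share_apples apples k)

-- ===== LEMMAS AND PROOFS =====

-- A's loop shape: a foldl that conditionally adds is the sum of a 0-padded map.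
theorem pv_foldl_if_add {α : Type} (p : α → Prop) [DecidablePred p] (h : α → Int) :
    ∀ (l : List α) (a : Int),
      l.foldl (fun t x => if p x then t + h x else t) a
        = a + (l.map (fun x => if p x then h x else 0)).sum := by
  intro l
  induction l with
  | nil => intro a; simp
  | cons x xs ih =>
      intro a
      by_cases hx : p x <;> simp [List.foldl_cons, hx, ih, add_assoc]

-- distinct-values sum weighted by counts equals the per-element sum
theorem pv_set_count_mul_sum (f : Int → Int) (xs : List Int) :
    ((PySem.Set.ofList xs).map (fun v => (xs.count v : Int) * f v)).sum
      = (xs.map f).sum := by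
  have hnd : (PySem.Set.ofList xs).Nodup := PySem.Set.nodup_ofList xs
  have htf : (PySem.Set.ofList xs).toFinset = xs.toFinset := by
    ext v
    simp [List.mem_toFinset, PySem.Set.mem_ofList]
  calc ((PySem.Set.ofList xs).map (fun v => (xs.count v : Int) * f v)).sum
      = (PySem.Set.ofList xs).toFinset.sum (fun v => (xs.count v : Int) * f v) :=
        (List.sum_toFinset _ hnd).symm
    _ = xs.toFinset.sum (fun v => (xs.count v : Int) * f v) := by rw [htf]
    _ = (xs.map f).sum := by
        rw [Finset.sum_list_map_count xs f]
        refine Finset.sum_congr rfl fun v _ => ?_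
        simp

-- A's value is the per-element deficit sum over the (unsorted) list.
theorem pv_A_eq_sum (apples : List Int) (k : Int) :
    min_moves_to_share_apples apples k
      = (apples.map (fun a => if a < k then k - a else 0)).sum := by
  unfold min_moves_to_share_apples
  show ((PySem.Dict.counter apples).items.foldl
      (fun total_moves p => if p.1 < k then total_moves + p.2 * (k - p.1) else total_moves) 0) = _
  rw [pv_foldl_if_add, PySem.Dict.items_counter]
  rw [List.map_map]
  have := pv_set_count_mul_sum (fun v => if v < k then k - v else 0) apples
  rw [← this]
  simp only [zero_add]
  congr 1
  refine List.map_congr_left fun v _ => ?_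
  by_cases hv : v < k <;> simp [Function.comp, hv]

-- B's break-loop on a (≤)-pairwise list computes the per-element deficit sum via k*m - s.
theorem pv_loop_sum (k : Int) :
    ∀ (l : List Int) (ts cs : Int), l.Pairwise (· ≤ ·) →
      k * (pvAltLoop k l (ts, cs)).2 - (pvAltLoop k l (ts, cs)).1
        = (k * cs - ts) + (l.map (fun a => if a < k then k - a else 0)).sum := by
  intro l
  induction l with
  | nil => intro ts cs _; simp [pvAltLoop]
  | cons a rest ih =>
      intro ts cs hp
      rcases List.pairwise_cons.mp hp with ⟨hall, hrest⟩
      by_cases ha : a ≥ k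
      · have hz : (rest.map (fun x => if x < k then k - x else 0)).sum = 0 := by
          apply List.sum_eq_zero
          intro x hx
          rcases List.mem_map.mp hx with ⟨y, hy, rfl⟩
          have : k ≤ y := le_trans ha (hall y hy)
          simp [not_lt.mpr this]
        simp [pvAltLoop, ha, hz, not_lt.mpr ha]
      · have ha' : a < k := lt_of_not_ge ha
        rw [show pvAltLoop k (a :: rest) (ts, cs) = pvAltLoop k rest (ts + a, cs + 1) by
          simp [pvAltLoop, ha]]
        rw [ih (ts + a) (cs + 1) hrest]
        simp [ha']
        ring

theorem min_moves_eq (apples : List Int) (k : Int) :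
    min_moves_to_share_apples apples k = min_moves_to_share_apples_alt apples k := by
  rw [pv_A_eq_sum]
  unfold min_moves_to_share_apples_alt
  have hpw : (PySem.List.sorted apples (fun x => x) false).Pairwise (· ≤ ·) := by
    have := PySem.List.sorted_pairwise (xs := apples) (key := fun x => x)
    simpa using this
  have hperm : (PySem.List.sorted apples (fun x => x) false).Perm apples :=
    PySem.List.sorted_perm ..
  rw [pv_loop_sum k _ 0 0 hpw]
  have : ((PySem.List.sorted apples (fun x => x) false).map
      (fun a => if a < k then k - a else 0)).sum
      = (apples.map (fun a => if a < k then k - a else 0)).sum :=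
    List.Perm.sum_eq (hperm.map _)
  rw [this]; ring

-- ===== VERDICT =====
theorem min_moves_to_share_apples_spec : Claim_equal_min_moves_to_share_apples := by
  intro apples k _
  exact min_moves_eq apples k
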